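-- pv_equiv track=rewrite | github.com/stephen-lazaro/Misc | py/poetry.py | leiner
-- ===== SOURCE A (Python) =====
-- def leiner(input):
--   result = []
--   lein = []
--   for i in input:
--     if i == "\n":
--       result.append(lein)
--       lein = []
--     else:
--       lein.append(i)
--   return result
-- ===== SOURCE B (Python) =====
-- def leiner(input):
--     items = list(input)
--     cuts = [idx for idx, x in enumerate(items) if x == "\n"]
--     result = []
--     prev = 0
--     for c in cuts:
--         result.append(items[prev:c])
--         prev = c + 1
--     return result
-- ===== Notes on version B (the rewrite author's own statement) =====
-- stated objective: alternative
-- what changed: Instead of A's single element-by-element pass accumulating the current segment, B first collects the newline positions and then emits each segment as a slice between consecutive cut positions.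
import Mathlib
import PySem

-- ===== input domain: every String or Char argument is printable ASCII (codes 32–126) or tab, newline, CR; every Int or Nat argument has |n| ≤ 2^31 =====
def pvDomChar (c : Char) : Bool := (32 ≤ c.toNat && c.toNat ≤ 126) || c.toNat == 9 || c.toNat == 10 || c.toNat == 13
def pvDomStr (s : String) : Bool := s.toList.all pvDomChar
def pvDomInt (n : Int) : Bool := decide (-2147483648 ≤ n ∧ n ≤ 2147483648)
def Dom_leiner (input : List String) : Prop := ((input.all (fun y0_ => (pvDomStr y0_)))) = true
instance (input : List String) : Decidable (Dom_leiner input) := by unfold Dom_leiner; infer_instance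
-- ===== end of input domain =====

-- B collects the newline positions first and then emits each segment as a slice between
-- consecutive cuts (a different decomposition of the same O(n) task); return values proved equal.

-- ===== PORT A =====
-- A: one pass, state (result, lein); append lein on "\n", otherwise grow lein.
def leiner (input : List String) : List (List String) :=
  let s := input.foldl
    (fun (st : List (List String) × List String) i =>
      if i = "\n" then (st.1 ++ [st.2], []) else (st.1, st.2 ++ [i]))
    ([], [])
  s.1

-- ===== PORT B =====
-- B: cuts = [idx for idx, x in enumerate(items) if x == "\n"]; then walk cuts,
-- appending items[prev:c] and setting prev = c + 1.
def leiner_alt (input : List String) : List (List String) :=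
  let items := input
  let cuts := (PySem.List.enumerate items 0).filterMap
    (fun p => if p.2 = "\n" then some p.1 else none)
  let s := cuts.foldl
    (fun (st : List (List String) × Int) c =>
      (st.1 ++ [PySem.List.slice items (some st.2) (some c)], c + 1))
    ([], 0)
  s.1

-- ===== PRECONDITION & SPEC =====
def Spec_leiner (input : List String) (out : List (List String)) : Prop := out = leiner_alt input
instance (input : List String) (out : List (List String)) : Decidable (Spec_leiner input out) := by unfold Spec_leiner; infer_instance

-- ===== CLAIM (what is proved, stated in full; the proofs are below) =====
def Claim_equal_leiner : Prop := ∀ (input : List String), Dom_leiner input → Spec_leiner input (leiner input)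

-- ===== LEMMAS AND PROOFS =====

-- reference splitter: segments produced from xs when the current partial segment is seg
def pvGo : List String → List String → List (List String)
  | _, [] => []
  | seg, x :: xs => if x = "\n" then seg :: pvGo [] xs else pvGo (seg ++ [x]) xs

-- A's fold computes pvGo
theorem pvA_go (xs : List String) (res : List (List String)) (seg : List String) :
    (xs.foldl
      (fun (st : List (List String) × List String) i =>
        if i = "\n" then (st.1 ++ [st.2], []) else (st.1, st.2 ++ [i]))
      (res, seg)).1 = res ++ pvGo seg xs := by
  induction xs generalizing res seg with
  | nil => simp [pvGo]
  | cons x xs ih =>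
    by_cases hx : x = "\n" <;> simp [pvGo, hx, ih]

-- newline positions of a suffix, relative to the start of the suffix
def pvCuts : List String → List Int
  | [] => []
  | x :: xs => if x = "\n" then 0 :: (pvCuts xs).map (· + 1) else (pvCuts xs).map (· + 1)

-- B's comprehension computes pvCuts shifted by the enumeration start
theorem pvCuts_eq (xs : List String) (s : Int) :
    (PySem.List.enumerate xs s).filterMap
      (fun p => if p.2 = "\n" then some p.1 else none)
      = (pvCuts xs).map (fun c => c + s) := by
  induction xs generalizing s with
  | nil => simp [PySem.List.enumerate_nil, pvCuts]
  | cons x xs ih =>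
    by_cases hx : x = "\n" <;>
      simp only [PySem.List.enumerate_cons, List.filterMap_cons, hx, reduceIte, pvCuts,
        ih (s + 1), List.map_cons, List.map_map]
    · refine congrArg₂ _ (by ring) ?_
      apply List.map_congr_left; intro c _; simp only [Function.comp]; ring
    · apply List.map_congr_left; intro c _; simp only [Function.comp]; ring

theorem pv_map_shift (l : List Int) (S : Int) :
    (l.map (· + 1)).map (fun c => c + S) = l.map (fun c => c + (S + 1)) := by
  rw [List.map_map]; apply List.map_congr_left; intro c _; simp only [Function.comp]; ring

-- B's fold over the shifted cuts of the suffix xs computes pvGo seg xs, where seg is the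
-- segment of items between prev = pre.length and the suffix, and S is its end position
theorem pvB_go (xs : List String) (items pre seg : List String) (res : List (List String))
    (p S : Int) (hp : p = (pre.length : Int)) (hS : S = (pre.length : Int) + (seg.length : Int))
    (hitems : items = pre ++ seg ++ xs) :
    (((pvCuts xs).map (fun c => c + S)).foldl
      (fun (st : List (List String) × Int) c =>
        (st.1 ++ [PySem.List.slice items (some st.2) (some c)], c + 1))
      (res, p)).1 = res ++ pvGo seg xs := by
  induction xs generalizing items pre seg res p S with
  | nil => simp [pvCuts, pvGo]
  | cons x xs ih =>
    by_cases hx : x = "\n"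
    · simp only [pvCuts, hx, reduceIte, pvGo, List.map_cons, List.foldl_cons, pv_map_shift]
      have hsl : PySem.List.slice items (some p) (some (0 + S)) = seg := by
        subst hp hS hitems
        rw [zero_add, PySem.List.slice_natCast_add]
        simp [List.append_assoc]
      rw [hsl, ih items (pre ++ seg ++ ["\n"]) [] (res ++ [seg]) (0 + S + 1) (S + 1)
        (by subst hS; simp; ring) (by subst hS; simp; ring)
        (by subst hitems; simp [hx])]
      simp
    · simp only [pvCuts, hx, reduceIte, pvGo, pv_map_shift]
      exact ih items pre (seg ++ [x]) res p (S + 1) hp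
        (by subst hS; simp; ring) (by subst hitems; simp)

-- ===== VERDICT (by name: the statement is the Claim_ definition above) =====
theorem leiner_spec : Claim_equal_leiner := by
  intro input _
  show leiner input = leiner_alt input
  simp only [leiner, leiner_alt]
  rw [pvCuts_eq input 0, pvA_go input [] []]
  exact (pvB_go input input [] [] [] 0 0 (by simp) (by simp) (by simp)).symm
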